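-- pv_equiv track=rewrite | github.com/phpedroandrade2008-code/ia-viva-servidor | main.py | normalize_asset
-- ===== SOURCE A (Python) =====
-- from typing import Any, Dict, Optional, Tuple
--
-- def safe_str(value: Any) -> str:
--     return str(value).strip() if value is not None else ""
--
-- def normalize_asset(value: Any) -> str:
--     raw = safe_str(value).upper()
--     if not raw:
--         return ""
--
--     compact = (
--         raw.replace(" ", "")
--         .replace("/", "")
--         .replace("-", "")
--         .replace("_", "")
--         .replace(":", "")
--     )
--
--     if "BITCOIN" in raw or "BTCUSDT" in compact:
--         return "BTCUSDT"
--     if "ETHEREUM" in raw or "ETHER" in raw or "ETHUSDT" in compact: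
--         return "ETHUSDT"
--     if "SOLANA" in raw or "SOLUSDT" in compact:
--         return "SOLUSDT"
--     if "XRPUSDT" in compact or "RIPPLE" in raw:
--         return "XRPUSDT"
--     if "DOGEUSDT" in compact or "DOGECOIN" in raw:
--         return "DOGEUSDT"
--     if "BNBUSDT" in compact:
--         return "BNBUSDT"
--     if "XAUUSD" in compact or "GOLD" in raw or "OURO" in raw:
--         return "XAUUSD"
--     if "EURUSD" in compact:
--         return "EURUSD"
--     if "GBPUSD" in compact:
--         return "GBPUSD"
--     if "USDJPY" in compact:
--         return "USDJPY"
--     if "NAS100" in compact or "US100" in compact: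
--         return "NAS100"
--     if "SPX" in compact or "US500" in compact or "SP500" in compact:
--         return "SPX"
--
--     allowed = "".join(ch for ch in compact if ch.isalnum() or ch == ".")
--     if 3 <= len(allowed) <= 14:
--         return allowed
--
--     return ""
-- ===== SOURCE B (Python) =====
-- # B: instead of testing each keyword with a substring search ("X in raw" chain),
-- # slide a window over the two texts once and look each window up in a hash index
-- # keyword -> rule priority, keeping the smallest priority seen; then map the
-- # priority to its canonical symbol.
--
-- _CANON = ("BTCUSDT", "ETHUSDT", "SOLUSDT", "XRPUSDT", "DOGEUSDT", "BNBUSDT",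
--           "XAUUSD", "EURUSD", "GBPUSD", "USDJPY", "NAS100", "SPX")
--
-- # (haystack tag, keyword) -> priority (= index into _CANON); "R" = raw, "C" = compact
-- _KW = {
--     ("R", "BITCOIN"): 0, ("C", "BTCUSDT"): 0,
--     ("R", "ETHEREUM"): 1, ("R", "ETHER"): 1, ("C", "ETHUSDT"): 1,
--     ("R", "SOLANA"): 2, ("C", "SOLUSDT"): 2,
--     ("C", "XRPUSDT"): 3, ("R", "RIPPLE"): 3,
--     ("C", "DOGEUSDT"): 4, ("R", "DOGECOIN"): 4,
--     ("C", "BNBUSDT"): 5,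
--     ("C", "XAUUSD"): 6, ("R", "GOLD"): 6, ("R", "OURO"): 6,
--     ("C", "EURUSD"): 7,
--     ("C", "GBPUSD"): 8,
--     ("C", "USDJPY"): 9,
--     ("C", "NAS100"): 10, ("C", "US100"): 10,
--     ("C", "SPX"): 11, ("C", "US500"): 11, ("C", "SP500"): 11,
-- }
--
-- _LENS = (3, 4, 5, 6, 7, 8)  # the distinct keyword lengths
--
-- def normalize_asset(value):
--     raw = ("" if value is None else str(value).strip()).upper()
--     if not raw:
--         return ""
--     compact = (raw.replace(" ", "").replace("/", "").replace("-", "")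
--                   .replace("_", "").replace(":", ""))
--     best = None
--     for tag, text in (("R", raw), ("C", compact)):
--         for i in range(len(text)):
--             for L in _LENS:
--                 p = _KW.get((tag, text[i:i + L]))
--                 if p is not None and (best is None or p < best):
--                     best = p
--     if best is not None:
--         return _CANON[best]
--     allowed = "".join(ch for ch in compact if ch.isalnum() or ch == ".")
--     return allowed if 3 <= len(allowed) <= 14 else ""
-- ===== Notes on version B (the rewrite author's own statement) =====
-- stated objective: alternative
-- what changed: Replaced the per-keyword substring-search if-chain by a single sliding-window pass over raw and compact: every window is looked up in a hash index keyword->rule priority and the smallest priority seen is kept, then mapped to its canonical symbol; guard, compact construction and length fallback unchanged.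
import Mathlib
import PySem

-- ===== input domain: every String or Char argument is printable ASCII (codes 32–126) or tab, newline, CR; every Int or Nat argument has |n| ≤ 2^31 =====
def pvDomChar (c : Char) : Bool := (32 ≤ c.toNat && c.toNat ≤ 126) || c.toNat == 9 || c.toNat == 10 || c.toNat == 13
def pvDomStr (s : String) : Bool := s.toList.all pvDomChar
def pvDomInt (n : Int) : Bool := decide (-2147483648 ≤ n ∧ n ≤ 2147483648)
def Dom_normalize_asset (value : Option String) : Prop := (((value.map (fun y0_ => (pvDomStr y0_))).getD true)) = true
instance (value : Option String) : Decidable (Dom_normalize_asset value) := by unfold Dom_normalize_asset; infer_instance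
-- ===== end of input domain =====

-- B replaces A's per-keyword substring-search if-chain by one sliding-window pass over the two
-- texts with a hash index keyword -> rule priority, keeping the minimum priority seen; return
-- value only, no side effects.

-- ===== PORT A =====
def safe_str (value : Option String) : String :=
  match value with
  | none => ""
  | some v => PySem.Str.strip v

def pvCompact (raw : String) : String :=
  PySem.Str.replace (PySem.Str.replace (PySem.Str.replace (PySem.Str.replace
    (PySem.Str.replace raw " " "") "/" "") "-" "") "_" "") ":" ""

-- 'allowed = "".join(ch for ch in compact if ch.isalnum() or ch == ".")' — joined chars = filter on the char list (exact)
def pvAllowed (compact : String) : String :=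
  String.ofList (compact.toList.filter (fun ch => PySem.Chars.isalnum ch || ch == '.'))

-- A's if-chain from 'if "BITCOIN" in raw …' down to the trailing allowed/length fallback
def pvChainA (raw compact : String) : String :=
  if PySem.Str.isIn "BITCOIN" raw || PySem.Str.isIn "BTCUSDT" compact then "BTCUSDT"
  else if PySem.Str.isIn "ETHEREUM" raw || PySem.Str.isIn "ETHER" raw || PySem.Str.isIn "ETHUSDT" compact then "ETHUSDT"
  else if PySem.Str.isIn "SOLANA" raw || PySem.Str.isIn "SOLUSDT" compact then "SOLUSDT"
  else if PySem.Str.isIn "XRPUSDT" compact || PySem.Str.isIn "RIPPLE" raw then "XRPUSDT"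
  else if PySem.Str.isIn "DOGEUSDT" compact || PySem.Str.isIn "DOGECOIN" raw then "DOGEUSDT"
  else if PySem.Str.isIn "BNBUSDT" compact then "BNBUSDT"
  else if PySem.Str.isIn "XAUUSD" compact || PySem.Str.isIn "GOLD" raw || PySem.Str.isIn "OURO" raw then "XAUUSD"
  else if PySem.Str.isIn "EURUSD" compact then "EURUSD"
  else if PySem.Str.isIn "GBPUSD" compact then "GBPUSD"
  else if PySem.Str.isIn "USDJPY" compact then "USDJPY"
  else if PySem.Str.isIn "NAS100" compact || PySem.Str.isIn "US100" compact then "NAS100"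
  else if PySem.Str.isIn "SPX" compact || PySem.Str.isIn "US500" compact || PySem.Str.isIn "SP500" compact then "SPX"
  else
    let allowed := pvAllowed compact
    if 3 ≤ allowed.toList.length ∧ allowed.toList.length ≤ 14 then allowed else ""

def normalize_asset (value : Option String) : String :=
  let raw := PySem.Str.upper (safe_str value)
  if raw = "" then ""
  else pvChainA raw (pvCompact raw)

-- ===== PORT B =====
def pvCanon : List String :=
  ["BTCUSDT", "ETHUSDT", "SOLUSDT", "XRPUSDT", "DOGEUSDT", "BNBUSDT",
   "XAUUSD", "EURUSD", "GBPUSD", "USDJPY", "NAS100", "SPX"]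

-- the _KW dict: (haystack tag, keyword) -> priority; "R" = raw, "C" = compact
def pvKW : PySem.Dict (String × String) Int := PySem.Dict.ofList
  [ (("R", "BITCOIN"), 0), (("C", "BTCUSDT"), 0),
    (("R", "ETHEREUM"), 1), (("R", "ETHER"), 1), (("C", "ETHUSDT"), 1),
    (("R", "SOLANA"), 2), (("C", "SOLUSDT"), 2),
    (("C", "XRPUSDT"), 3), (("R", "RIPPLE"), 3),
    (("C", "DOGEUSDT"), 4), (("R", "DOGECOIN"), 4),
    (("C", "BNBUSDT"), 5),
    (("C", "XAUUSD"), 6), (("R", "GOLD"), 6), (("R", "OURO"), 6),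
    (("C", "EURUSD"), 7),
    (("C", "GBPUSD"), 8),
    (("C", "USDJPY"), 9),
    (("C", "NAS100"), 10), (("C", "US100"), 10),
    (("C", "SPX"), 11), (("C", "US500"), 11), (("C", "SP500"), 11) ]

def pvLens : List Int := [3, 4, 5, 6, 7, 8]

-- 'for i in range(len(text)): for L in _LENS: p = _KW.get((tag, text[i:i+L])); if …: best = p'
def pvScan (tag text : String) (best : Option Int) : Option Int :=
  (PySem.List.pyRange 0 (PySem.Str.len text)).foldl (fun b i =>
    pvLens.foldl (fun b L =>
      match pvKW.get? (tag, PySem.Str.slice text (some i) (some (i + L))) with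
      | none => b
      | some p =>
        match b with
        | none => some p
        | some q => if p < q then some p else b) b) best

-- the 'if best is not None … return allowed-fallback' tail of B, on raw and compact
def pvDispatchB (raw compact : String) : String :=
  match pvScan "C" compact (pvScan "R" raw none) with
  | some p => (PySem.List.pyGet? pvCanon p).getD ""   -- '_CANON[best]'; best is always 0..11, so the getD default is never used
  | none =>
    let allowed := pvAllowed compact
    if 3 ≤ allowed.toList.length ∧ allowed.toList.length ≤ 14 then allowed else ""

def normalize_asset_alt (value : Option String) : String :=
  let raw := PySem.Str.upper (match value with | none => "" | some v => PySem.Str.strip v)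
  if raw = "" then ""
  else pvDispatchB raw (pvCompact raw)

-- ===== PRECONDITION & SPEC =====
def Spec_normalize_asset (value : Option String) (out : String) : Prop := out = normalize_asset_alt value
instance (value : Option String) (out : String) : Decidable (Spec_normalize_asset value out) := by unfold Spec_normalize_asset; infer_instance

-- ===== CLAIM (what is proved, stated in full; the proofs are below) =====
def Claim_equal_normalize_asset : Prop := ∀ (value : Option String), Dom_normalize_asset value → Spec_normalize_asset value (normalize_asset value)

-- ===== LEMMAS AND PROOFS =====

-- 'min' accumulation step of B's loop, as a function
def pvOmin (b : Option Int) (p : Int) : Option Int :=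
  match b with | none => some p | some q => if p < q then some p else some q

def pvLook (tag text : String) (c : Int × Int) : Option Int :=
  pvKW.get? (tag, PySem.Str.slice text (some c.1) (some (c.1 + c.2)))

def pvCands (text : String) : List (Int × Int) :=
  (PySem.List.pyRange 0 (PySem.Str.len text)).flatMap (fun i => pvLens.map (fun L => (i, L)))

def pvHits (tag text : String) : List Int :=
  (pvCands text).filterMap (pvLook tag text)

-- the keywords B indexes for each haystack, with their priorities
def pvTagKW (tag : String) : List (String × Int) :=
  if tag = "R" then
    [("BITCOIN", 0), ("ETHEREUM", 1), ("ETHER", 1), ("SOLANA", 2), ("RIPPLE", 3),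
     ("DOGECOIN", 4), ("GOLD", 6), ("OURO", 6)]
  else
    [("BTCUSDT", 0), ("ETHUSDT", 1), ("SOLUSDT", 2), ("XRPUSDT", 3), ("DOGEUSDT", 4),
     ("BNBUSDT", 5), ("XAUUSD", 6), ("EURUSD", 7), ("GBPUSD", 8), ("USDJPY", 9),
     ("NAS100", 10), ("US100", 10), ("SPX", 11), ("US500", 11), ("SP500", 11)]

-- the same matched-priority set grouped by rule, with A's exact conditions
def pvMatched12 (raw compact : String) : List Int :=
  ([ (PySem.Str.isIn "BITCOIN" raw || PySem.Str.isIn "BTCUSDT" compact, 0),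
     (PySem.Str.isIn "ETHEREUM" raw || PySem.Str.isIn "ETHER" raw || PySem.Str.isIn "ETHUSDT" compact, 1),
     (PySem.Str.isIn "SOLANA" raw || PySem.Str.isIn "SOLUSDT" compact, 2),
     (PySem.Str.isIn "XRPUSDT" compact || PySem.Str.isIn "RIPPLE" raw, 3),
     (PySem.Str.isIn "DOGEUSDT" compact || PySem.Str.isIn "DOGECOIN" raw, 4),
     (PySem.Str.isIn "BNBUSDT" compact, 5),
     (PySem.Str.isIn "XAUUSD" compact || PySem.Str.isIn "GOLD" raw || PySem.Str.isIn "OURO" raw, 6),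
     (PySem.Str.isIn "EURUSD" compact, 7),
     (PySem.Str.isIn "GBPUSD" compact, 8),
     (PySem.Str.isIn "USDJPY" compact, 9),
     (PySem.Str.isIn "NAS100" compact || PySem.Str.isIn "US100" compact, 10),
     (PySem.Str.isIn "SPX" compact || PySem.Str.isIn "US500" compact || PySem.Str.isIn "SP500" compact, 11) ]
   : List (Bool × Int)).filterMap (fun cp => if cp.1 then some cp.2 else none)

theorem foldl_omin_char (l : List Int) (b : Option Int) :
    l.foldl pvOmin b = match b, l.min? with
      | none, m => m
      | some q, none => some q
      | some q, some m => some (min q m) := by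
  induction l generalizing b with
  | nil => cases b <;> rfl
  | cons a t ih =>
    rw [List.foldl_cons, ih]
    cases b with
    | none =>
      simp only [pvOmin, List.min?_cons]
      cases h : t.min? <;> simp
    | some q =>
      simp only [pvOmin, List.min?_cons]
      cases h : t.min? <;> split_ifs <;> simp <;> omega

theorem pv_min?_congr (l l' : List Int) (h : ∀ x, x ∈ l ↔ x ∈ l') : l.min? = l'.min? := by
  cases hl : l'.min? with
  | none =>
    rw [List.min?_eq_none_iff] at hl ⊢
    subst hl; cases l with
    | nil => rfl
    | cons a t => exact absurd ((h a).mp (List.mem_cons_self)) (by simp)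
  | some m =>
    rw [List.min?_eq_some_iff] at hl ⊢
    exact ⟨(h m).mpr hl.1, fun b hb => hl.2 b ((h b).mp hb)⟩

theorem foldl_omin_congr (l l' : List Int) (h : ∀ x, x ∈ l ↔ x ∈ l') (b : Option Int) :
    l.foldl pvOmin b = l'.foldl pvOmin b := by
  rw [foldl_omin_char, foldl_omin_char, pv_min?_congr l l' h]

-- B's nested scan loop is the fold of pvOmin over the priorities its lookups hit
theorem pv_scan_eq (tag text : String) (b : Option Int) :
    pvScan tag text b = (pvHits tag text).foldl pvOmin b := by
  unfold pvScan pvHits pvCands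
  rw [List.foldl_filterMap, List.foldl_flatMap]
  apply PySem.List.foldl_congr_mem
  intro acc i _
  rw [List.foldl_map]
  apply PySem.List.foldl_congr_mem
  intro acc' L _
  simp only [pvLook]
  cases pvKW.get? (tag, PySem.Str.slice text (some i) (some (i + L))) with
  | none => rfl
  | some p => cases acc' with
    | none => rfl
    | some q => simp [pvOmin]

-- B's hash lookup hits exactly the indexed keywords of that tag
set_option maxHeartbeats 1600000 in
theorem pv_look_iff (tag : String) (htag : tag = "R" ∨ tag = "C") (w : String) (p : Int) :
    pvKW.get? (tag, w) = some p ↔ (w, p) ∈ pvTagKW tag := by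
  have h : pvKW = PySem.Dict.mk
    [ (("R", "BITCOIN"), 0), (("C", "BTCUSDT"), 0),
      (("R", "ETHEREUM"), 1), (("R", "ETHER"), 1), (("C", "ETHUSDT"), 1),
      (("R", "SOLANA"), 2), (("C", "SOLUSDT"), 2),
      (("C", "XRPUSDT"), 3), (("R", "RIPPLE"), 3),
      (("C", "DOGEUSDT"), 4), (("R", "DOGECOIN"), 4),
      (("C", "BNBUSDT"), 5),
      (("C", "XAUUSD"), 6), (("R", "GOLD"), 6), (("R", "OURO"), 6),
      (("C", "EURUSD"), 7),
      (("C", "GBPUSD"), 8),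
      (("C", "USDJPY"), 9),
      (("C", "NAS100"), 10), (("C", "US100"), 10),
      (("C", "SPX"), 11), (("C", "US500"), 11), (("C", "SP500"), 11) ] := by rfl
  rcases htag with rfl | rfl <;> rw [h] <;> simp only [PySem.Dict.get?, List.find?_cons] <;>
    (repeat' split) <;> simp_all [pvTagKW, Prod.mk.injEq, @eq_comm String] <;> omega

-- a window of some admissible length equals nd iff nd occurs as a substring
theorem pv_window_iff (text nd : String) (h1 : nd.toList ≠ [])
    (h2 : (nd.toList.length : Int) ∈ pvLens) :
    (∃ i ∈ PySem.List.pyRange 0 (PySem.Str.len text), ∃ L ∈ pvLens,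
        PySem.Str.slice text (some i) (some (i + L)) = nd)
    ↔ PySem.Str.isIn nd text = true := by
  rw [PySem.Str.isIn_iff_infix]
  constructor
  · rintro ⟨i, hi, L, hL, heq⟩
    rw [PySem.List.mem_pyRange_one] at hi
    have h0i : 0 ≤ i := hi.1
    have h0L : (0:Int) ≤ L := by
      simp only [pvLens, List.mem_cons, List.not_mem_nil, or_false] at hL
      rcases hL with h|h|h|h|h|h <;> omega
    have h0iL : 0 ≤ i + L := by omega
    have := congrArg String.toList heq
    rw [PySem.Str.toList_slice, PySem.Chars.slice_eq_listSlice,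
      PySem.List.slice_toNat _ h0i h0iL] at this
    rw [← this]
    exact ((List.take_prefix _ _).isInfix).trans ((List.drop_suffix _ _).isInfix)
  · intro hinf
    have : PySem.Chars.isIn nd.toList text.toList = true := by
      rw [PySem.Chars.isIn_iff_infix]; exact hinf
    obtain ⟨j, hj⟩ := (PySem.Chars.exists_prefix_drop_iff_isIn nd.toList text.toList).mpr this
    have hjl : j < text.toList.length := by
      by_contra hge
      rw [List.drop_eq_nil_of_le (by omega)] at hj
      exact h1 (List.prefix_nil.mp hj)
    refine ⟨(j : Int), ?_, (nd.toList.length : Int), h2, ?_⟩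
    · rw [PySem.List.mem_pyRange_one, PySem.Str.len_eq]
      constructor <;> [positivity; exact_mod_cast hjl]
    · apply String.toList_inj.mp
      rw [PySem.Str.toList_slice, PySem.Chars.slice_eq_listSlice,
        PySem.List.slice_natCast_add]
      exact (List.prefix_iff_eq_take.mp hj).symm
  
-- every keyword B indexes is nonempty and of an admissible length
theorem pv_tagKW_ok (tag : String) : ∀ nd ∈ pvTagKW tag,
    nd.1.toList ≠ [] ∧ ((nd.1.toList.length : Int) ∈ pvLens) := by
  unfold pvTagKW; split_ifs <;> decide

-- the priorities B's scan hits are exactly the priorities of occurring keywords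
set_option maxHeartbeats 1600000 in
theorem pv_mem_hits (tag : String) (htag : tag = "R" ∨ tag = "C") (text : String) (p : Int) :
    p ∈ pvHits tag text ↔
      ∃ nd ∈ pvTagKW tag, PySem.Str.isIn nd.1 text = true ∧ nd.2 = p := by
  unfold pvHits
  rw [List.mem_filterMap]
  constructor
  · rintro ⟨c, hc, hlook⟩
    simp only [pvCands, List.mem_flatMap, List.mem_map] at hc
    obtain ⟨i, hi, L, hL, rfl⟩ := hc
    simp only [pvLook] at hlook
    rw [pv_look_iff tag htag] at hlook
    refine ⟨_, hlook, ?_, rfl⟩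
    have hok := pv_tagKW_ok tag _ hlook
    exact (pv_window_iff text _ hok.1 hok.2).mp ⟨i, hi, L, hL, rfl⟩
  · rintro ⟨nd, hnd, hisin, rfl⟩
    have hok := pv_tagKW_ok tag _ hnd
    obtain ⟨i, hi, L, hL, heq⟩ := (pv_window_iff text nd.1 hok.1 hok.2).mpr hisin
    refine ⟨(i, L), ?_, ?_⟩
    · simp only [pvCands, List.mem_flatMap, List.mem_map]
      exact ⟨i, hi, L, hL, rfl⟩
    · simp only [pvLook]
      rw [pv_look_iff tag htag, heq]
      exact hnd

-- B's whole scan = min-fold over the rule-grouped matched priorities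
set_option maxHeartbeats 1600000 in
theorem pv_best_eq (raw compact : String) :
    pvScan "C" compact (pvScan "R" raw none) = (pvMatched12 raw compact).foldl pvOmin none := by
  rw [pv_scan_eq, pv_scan_eq, ← List.foldl_append]
  apply foldl_omin_congr
  intro x
  rw [List.mem_append, pv_mem_hits "R" (Or.inl rfl), pv_mem_hits "C" (Or.inr rfl)]
  simp only [pvTagKW, pvMatched12, String.reduceEq, reduceIte, List.mem_filterMap,
    List.mem_cons, List.not_mem_nil, or_false, exists_eq_or_imp, exists_eq_left,
    ite_eq_iff, Option.some.injEq, reduceCtorEq, and_false, Bool.or_eq_true]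
  constructor
  · rintro ((⟨h,rfl⟩|⟨h,rfl⟩|⟨h,rfl⟩|⟨h,rfl⟩|⟨h,rfl⟩|⟨h,rfl⟩|⟨h,rfl⟩|⟨h,rfl⟩)|(⟨h,rfl⟩|⟨h,rfl⟩|⟨h,rfl⟩|⟨h,rfl⟩|⟨h,rfl⟩|⟨h,rfl⟩|⟨h,rfl⟩|⟨h,rfl⟩|⟨h,rfl⟩|⟨h,rfl⟩|⟨h,rfl⟩|⟨h,rfl⟩|⟨h,rfl⟩|⟨h,rfl⟩|⟨h,rfl⟩)) <;>
      simp_all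
  · rintro (⟨(h|h), rfl⟩ | ⟨(h|h)|h, rfl⟩ | ⟨(h|h), rfl⟩ | ⟨(h|h), rfl⟩ | ⟨(h|h), rfl⟩ | ⟨h, rfl⟩ |
      ⟨(h|h)|h, rfl⟩ | ⟨h, rfl⟩ | ⟨h, rfl⟩ | ⟨h, rfl⟩ | ⟨(h|h), rfl⟩ | ⟨(h|h)|h, rfl⟩) <;>
      simp_all

-- the if-chain equals priority-min selection over the same 12 conditions
set_option maxHeartbeats 2000000 in
theorem pv_chain_eq_min (raw compact : String) :
    pvChainA raw compact =
      (match (pvMatched12 raw compact).foldl pvOmin none with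
       | some p => (PySem.List.pyGet? pvCanon p).getD ""
       | none =>
         let allowed := pvAllowed compact
         if 3 ≤ allowed.toList.length ∧ allowed.toList.length ≤ 14 then allowed else "") := by
  unfold pvChainA pvMatched12
  generalize (PySem.Str.isIn "BITCOIN" raw || PySem.Str.isIn "BTCUSDT" compact) = b1
  generalize (PySem.Str.isIn "ETHEREUM" raw || PySem.Str.isIn "ETHER" raw || PySem.Str.isIn "ETHUSDT" compact) = b2
  generalize (PySem.Str.isIn "SOLANA" raw || PySem.Str.isIn "SOLUSDT" compact) = b3
  generalize (PySem.Str.isIn "XRPUSDT" compact || PySem.Str.isIn "RIPPLE" raw) = b4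
  generalize (PySem.Str.isIn "DOGEUSDT" compact || PySem.Str.isIn "DOGECOIN" raw) = b5
  generalize (PySem.Str.isIn "BNBUSDT" compact) = b6
  generalize (PySem.Str.isIn "XAUUSD" compact || PySem.Str.isIn "GOLD" raw || PySem.Str.isIn "OURO" raw) = b7
  generalize (PySem.Str.isIn "EURUSD" compact) = b8
  generalize (PySem.Str.isIn "GBPUSD" compact) = b9
  generalize (PySem.Str.isIn "USDJPY" compact) = b10
  generalize (PySem.Str.isIn "NAS100" compact || PySem.Str.isIn "US100" compact) = b11
  generalize (PySem.Str.isIn "SPX" compact || PySem.Str.isIn "US500" compact || PySem.Str.isIn "SP500" compact) = b12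
  generalize pvAllowed compact = al
  cases b1 <;> cases b2 <;> cases b3 <;> cases b4 <;> cases b5 <;> cases b6 <;>
    cases b7 <;> cases b8 <;> cases b9 <;> cases b10 <;> cases b11 <;> cases b12 <;> rfl

set_option maxHeartbeats 1000000 in
theorem pv_dispatch_eq (raw compact : String) :
    pvChainA raw compact = pvDispatchB raw compact := by
  unfold pvDispatchB
  rw [pv_best_eq, pv_chain_eq_min]

-- ===== VERDICT (by name: the statement is the Claim_ definition above) =====
theorem normalize_asset_spec : Claim_equal_normalize_asset := by
  intro value _
  unfold Spec_normalize_asset normalize_asset normalize_asset_alt safe_str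
  cases value with
  | none => rfl
  | some s =>
    by_cases h : PySem.Str.upper (PySem.Str.strip s) = ""
    · rw [if_pos h, if_pos h]
    · rw [if_neg h, if_neg h]
      exact pv_dispatch_eq _ _
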